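-- pv_equiv track=rewrite | github.com/bashbash96/InterviewPreparation | LeetCode/medium.py | count_enemies
-- ===== SOURCE A (Python) =====
-- def count_enemies(grid):
--     n = len(grid)
--     m = len(grid[0])
--
--     enemies_count = [[0 for _ in range(m)] for _ in range(n)]
--
--     for r in range(n):
--         curr = 0
--         last_wall = 0
--         for col in range(m):
--             if grid[r][col] == 'E':
--                 curr += 1
--             elif grid[r][col] == '0':
--                 continue
--             else:
--                 for j in range(last_wall, col):
--                     enemies_count[r][j] += curr
--                 last_wall = col + 1
--                 curr = 0
--
--         for j in range(last_wall, col + 1):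
--             enemies_count[r][j] += curr
--
--     for c in range(m):
--         curr = 0
--         last_wall = 0
--         for row in range(n):
--             if grid[row][c] == 'E':
--                 curr += 1
--             elif grid[row][c] == '0':
--                 continue
--             else:
--                 for i in range(last_wall, row):
--                     enemies_count[i][c] += curr
--                 last_wall = row + 1
--                 curr = 0
--
--         for i in range(last_wall, row + 1):
--             enemies_count[i][c] += curr
--
--     return enemies_count
-- ===== SOURCE B (Python) =====
-- def count_enemies(grid):
--     n = len(grid)
--     m = len(grid[0])
--
--     def line_counts(cells):
--         k = len(cells)
--         # prefix sums of enemy counts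
--         pref = [0] * (k + 1)
--         for i, x in enumerate(cells):
--             pref[i + 1] = pref[i] + (1 if x == 'E' else 0)
--         # index of the first cell of each cell's wall-bounded segment
--         left = [0] * k
--         lw = 0
--         for i, x in enumerate(cells):
--             left[i] = lw
--             if x != 'E' and x != '0':
--                 lw = i + 1
--         # index one past the last cell of each cell's segment
--         right = [0] * k
--         rw = k
--         for i in range(k - 1, -1, -1):
--             if cells[i] != 'E' and cells[i] != '0':
--                 right[i] = i
--                 rw = i
--             else:
--                 right[i] = rw
--         return [0 if (x != 'E' and x != '0') else pref[r] - pref[l]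
--                 for x, l, r in zip(cells, left, right)]
--
--     row_counts = [line_counts(row[:m]) for row in grid]
--     cols = [[grid[r][c] for r in range(n)] for c in range(m)]
--     col_counts = [line_counts(col) for col in cols]
--     return [[row_counts[r][c] + col_counts[c][r] for c in range(m)] for r in range(n)]
-- ===== Notes on version B (the rewrite author's own statement) =====
-- stated objective: alternative
-- what changed: Replaces A's in-place backfill-on-wall sweeps over a mutable 2D grid with pure per-line tables (prefix sums of enemy counts plus nearest-wall-left/right index arrays) computed once per row and per column and combined by lookups into a freshly built result grid.
import Mathlib
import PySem

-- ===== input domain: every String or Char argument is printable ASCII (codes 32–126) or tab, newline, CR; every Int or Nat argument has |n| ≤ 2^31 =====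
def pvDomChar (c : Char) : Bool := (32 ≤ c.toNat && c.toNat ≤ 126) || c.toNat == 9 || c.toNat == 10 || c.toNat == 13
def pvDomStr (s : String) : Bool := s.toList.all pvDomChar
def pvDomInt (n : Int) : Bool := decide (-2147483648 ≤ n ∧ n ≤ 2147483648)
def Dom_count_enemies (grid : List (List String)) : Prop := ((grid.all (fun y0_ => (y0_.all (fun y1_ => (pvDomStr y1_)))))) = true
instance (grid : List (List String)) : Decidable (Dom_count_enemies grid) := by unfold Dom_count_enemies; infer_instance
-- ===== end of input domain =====

-- B replaces A's in-place backfill-on-wall sweeps with pure per-line prefix-sum and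
-- nearest-wall index tables combined by lookup; same asymptotic cost (alternative, not faster).

-- ===== PORT A =====
-- `enemies_count[r][j] += curr` (indices are in range whenever Python does not raise)
def pvBump2 (e : List (List Int)) (r j : Nat) (v : Int) : List (List Int) :=
  e.modify r (fun row => row.modify j (fun t => t + v))

-- the sweep A performs twice (once per row, once per column): fold over positions with
-- state (grid, curr, last_wall); on a wall, backfill [last_wall, i) and reset; final backfill.
def pvPass (cell : Nat → String) (len : Nat)
    (bump : List (List Int) → Nat → Int → List (List Int)) (e : List (List Int)) :
    List (List Int) :=
  let res := (List.range len).foldl (fun (st : List (List Int) × Int × Nat) i =>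
      let x := cell i
      if x = "E" then (st.1, st.2.1 + 1, st.2.2)
      else if x = "0" then st
      else ((List.range' st.2.2 (i - st.2.2)).foldl (fun e j => bump e j st.2.1) st.1, 0, i + 1))
    (e, 0, 0)
  (List.range' res.2.2 (len - res.2.2)).foldl (fun e j => bump e j res.2.1) res.1

def count_enemies (grid : List (List String)) : List (List Int) :=
  let n := grid.length
  let m := (grid.getD 0 []).length
  let e0 := List.replicate n (List.replicate m (0 : Int))
  let e1 := (List.range n).foldl
    (fun e r => pvPass (fun col => (grid.getD r []).getD col "") m (fun e j v => pvBump2 e r j v) e) e0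
  (List.range m).foldl
    (fun e c => pvPass (fun row => (grid.getD row []).getD c "") n (fun e i v => pvBump2 e i c v) e) e1

-- ===== PORT B =====
def pvIsWall (x : String) : Bool := x ≠ "E" && x ≠ "0"

-- forward scan recording, for each index, the start of its wall-bounded segment
def pvLeftLoop : List String → Nat → Nat → List Nat
  | [], _, _ => []
  | x :: xs, i, lw => lw :: pvLeftLoop xs (i + 1) (if pvIsWall x then i + 1 else lw)

-- backward scan (over the reversed indexed list) recording the end of each segment
def pvRightLoop : List (String × Nat) → Nat → List Nat → List Nat
  | [], _, acc => acc
  | (x, i) :: rest, rw, acc =>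
    if pvIsWall x then pvRightLoop rest i (i :: acc) else pvRightLoop rest rw (rw :: acc)

def pvLineCounts (cells : List String) : List Int :=
  let k := cells.length
  let pref := List.scanl (fun a x => a + (if x = "E" then (1 : Int) else 0)) 0 cells
  let left := pvLeftLoop cells 0 0
  let right := pvRightLoop cells.zipIdx.reverse k []
  (cells.zip (left.zip right)).map (fun p =>
    if pvIsWall p.1 then 0 else pref.getD p.2.2 0 - pref.getD p.2.1 0)

def count_enemies_alt (grid : List (List String)) : List (List Int) :=
  let n := grid.length
  let m := (grid.getD 0 []).length
  let rowc := grid.map (fun row => pvLineCounts (row.take m))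
  let cols := (List.range m).map (fun c => (List.range n).map (fun r => (grid.getD r []).getD c ""))
  let colc := cols.map pvLineCounts
  (List.range n).map (fun r => (List.range m).map (fun c =>
    (rowc.getD r []).getD c 0 + (colc.getD c []).getD r 0))

-- ===== PRECONDITION & SPEC =====
-- Pre_ is exactly where Python A returns: a non-empty grid, a non-empty first row
-- (else `col`/`row` is unbound), and every row at least as long as the first (else IndexError).
def Pre_count_enemies (grid : List (List String)) : Prop :=
  grid ≠ [] ∧ 0 < (grid.headD []).length ∧
    ∀ row ∈ grid, (grid.headD []).length ≤ row.length
instance (grid : List (List String)) : Decidable (Pre_count_enemies grid) := by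
  unfold Pre_count_enemies; infer_instance
def pvWitness_count_enemies : List (List String) := [["E", "0"], ["W", "E"]]

def Spec_count_enemies (grid : List (List String)) (out : List (List Int)) : Prop :=
  out = count_enemies_alt grid
instance (grid : List (List String)) (out : List (List Int)) : Decidable (Spec_count_enemies grid out) := by
  unfold Spec_count_enemies; infer_instance

-- ===== CLAIM (what is proved, stated in full; the proofs are below) =====
def Claim_equal_count_enemies : Prop := ∀ (grid : List (List String)),
  Dom_count_enemies grid → Pre_count_enemies grid →
    Spec_count_enemies grid (count_enemies grid)
-- ===== LEMMAS AND PROOFS =====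

-- ---- spec-side helper functions (proof-only) ----

-- weighted enemy count of a list of cells
def pvCnt (l : List String) : Int := (l.map (fun x => if x = "E" then (1 : Int) else 0)).sum

-- enemy count of cells[a:b]
def pvCntE (cells : List String) (a b : Nat) : Int := pvCnt ((cells.drop a).take (b - a))

-- index after the last wall strictly before i
def pvLwS (cells : List String) : Nat → Nat
  | 0 => 0
  | i + 1 => if pvIsWall (cells.getD i "") then i + 1 else pvLwS cells i

-- first wall position in the list, indices starting at i (i + length if none)
def pvFWF : List String → Nat → Nat
  | [], i => i
  | x :: xs, i => if pvIsWall x then i else pvFWF xs (i + 1)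

-- first wall position at or after j (cells.length if none)
def pvRwS (cells : List String) (j : Nat) : Nat := pvFWF (cells.drop j) j

-- the intended per-line answer at index j
def pvFin (cells : List String) (j : Nat) : Int :=
  if pvIsWall (cells.getD j "") then 0 else pvCntE cells (pvLwS cells j) (pvRwS cells j)

-- the list of (index, value) bump operations A's pass performs, in order
def pvPassStep (cell : Nat → String) (st : List (Nat × Int) × Int × Nat) (i : Nat) :
    List (Nat × Int) × Int × Nat :=
  if cell i = "E" then (st.1, st.2.1 + 1, st.2.2)
  else if cell i = "0" then st
  else (st.1 ++ (List.range' st.2.2 (i - st.2.2)).map (fun j => (j, st.2.1)), 0, i + 1)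

def pvPassOps (cell : Nat → String) (len : Nat) : List (Nat × Int) :=
  let res := (List.range len).foldl (pvPassStep cell) ([], 0, 0)
  res.1 ++ (List.range' res.2.2 (len - res.2.2)).map (fun j => (j, res.2.1))

-- total value the operation list adds at index j
def pvSumAt (j : Nat) (ops : List (Nat × Int)) : Int :=
  (ops.map (fun p => if p.1 = j then p.2 else 0)).sum

-- ---- pass = fold of its operation list ----

theorem pvPass_eq_ops (cell : Nat → String) (len : Nat)
    (bump : List (List Int) → Nat → Int → List (List Int)) (e : List (List Int)) :
    pvPass cell len bump e = (pvPassOps cell len).foldl (fun e p => bump e p.1 p.2) e := by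
  have aux : ∀ (L : List Nat) (st : List (Nat × Int) × Int × Nat),
      L.foldl (fun (st' : List (List Int) × Int × Nat) i =>
          let x := cell i
          if x = "E" then (st'.1, st'.2.1 + 1, st'.2.2)
          else if x = "0" then st'
          else ((List.range' st'.2.2 (i - st'.2.2)).foldl (fun e j => bump e j st'.2.1) st'.1,
            0, i + 1))
        (st.1.foldl (fun e p => bump e p.1 p.2) e, st.2)
      = ((L.foldl (pvPassStep cell) st).1.foldl (fun e p => bump e p.1 p.2) e,
         (L.foldl (pvPassStep cell) st).2) := by
    intro L
    induction L with
    | nil => intro st; rfl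
    | cons a L ihL =>
      intro st
      rw [List.foldl_cons, List.foldl_cons]
      by_cases hE : cell a = "E"
      · simp only [pvPassStep, if_pos hE]
        exact ihL (st.1, st.2.1 + 1, st.2.2)
      · by_cases h0 : cell a = "0"
        · simp only [pvPassStep, if_neg hE, if_pos h0]
          exact ihL st
        · simp only [pvPassStep, if_neg hE, if_neg h0]
          rw [show (List.range' st.2.2 (a - st.2.2)).foldl (fun e j => bump e j st.2.1)
                (st.1.foldl (fun e p => bump e p.1 p.2) e)
              = ((st.1 ++ (List.range' st.2.2 (a - st.2.2)).map (fun j => (j, st.2.1))).foldl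
                  (fun e p => bump e p.1 p.2) e) from by
            rw [List.foldl_append, List.foldl_map]]
          exact ihL (st.1 ++ (List.range' st.2.2 (a - st.2.2)).map (fun j => (j, st.2.1)), 0, a + 1)
  have hmain := aux (List.range len) ([], 0, 0)
  simp only [List.foldl_nil] at hmain
  unfold pvPass pvPassOps
  simp only [hmain]
  rw [List.foldl_append, List.foldl_map]

-- ---- pointwise behaviour of bump folds ----

theorem pvBump2_length (e : List (List Int)) (r j : Nat) (v : Int) :
    (pvBump2 e r j v).length = e.length := by
  simp [pvBump2]

theorem pvBump2_row_length (e : List (List Int)) (r j : Nat) (v : Int) (i : Nat) :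
    ((pvBump2 e r j v).getD i []).length = (e.getD i []).length := by
  
  simp only [pvBump2, List.getD_eq_getElem?_getD, List.getElem?_modify]
  by_cases h : r = i <;> cases he : e[i]? <;> simp [h, List.length_modify]

theorem pvBump2_getD (e : List (List Int)) (r j : Nat) (v : Int) (i c : Nat)
    (hi : i < e.length) (hc : c < (e.getD i []).length) :
    ((pvBump2 e r j v).getD i []).getD c 0 =
      (e.getD i []).getD c 0 + (if r = i ∧ j = c then v else 0) := by
  
  have ha : e.getD i [] = e[i] := List.getD_eq_getElem e [] hi
  rw [ha] at hc
  simp only [pvBump2, List.getD_eq_getElem?_getD, List.getElem?_modify,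
    List.getElem?_eq_getElem hi]
  by_cases h : r = i <;> by_cases hj : j = c <;>
    simp [h, hj, ha, List.getElem?_modify, List.getElem?_eq_getElem hc]

theorem pvApplyRow_length (r : Nat) (ops : List (Nat × Int)) (e : List (List Int)) :
    (ops.foldl (fun e p => pvBump2 e r p.1 p.2) e).length = e.length := by
  
  induction ops generalizing e with
  | nil => rfl
  | cons p ops ih => rw [List.foldl_cons, ih, pvBump2_length]

theorem pvApplyRow_row_length (r : Nat) (ops : List (Nat × Int)) (e : List (List Int)) (i : Nat) :
    ((ops.foldl (fun e p => pvBump2 e r p.1 p.2) e).getD i []).length = (e.getD i []).length := by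
  
  induction ops generalizing e with
  | nil => rfl
  | cons p ops ih => rw [List.foldl_cons, ih, pvBump2_row_length]

theorem pvApplyRow_getD (r : Nat) (ops : List (Nat × Int)) (e : List (List Int)) (i c : Nat)
    (hi : i < e.length) (hc : c < (e.getD i []).length) :
    ((ops.foldl (fun e p => pvBump2 e r p.1 p.2) e).getD i []).getD c 0 =
      (e.getD i []).getD c 0 + (if r = i then pvSumAt c ops else 0) := by
  
  induction ops generalizing e with
  | nil => simp [pvSumAt]
  | cons p ops ih =>
    rw [List.foldl_cons]
    rw [ih _ (by rw [pvBump2_length]; exact hi) (by rw [pvBump2_row_length]; exact hc)]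
    rw [pvBump2_getD e r p.1 p.2 i c hi hc]
    have : pvSumAt c (p :: ops) = (if p.1 = c then p.2 else 0) + pvSumAt c ops := by
      simp [pvSumAt]
    rw [this]
    by_cases h : r = i
    · subst h; by_cases hj : p.1 = c <;> simp [hj] <;> ring
    · simp [h]

theorem pvApplyCol_length (c : Nat) (ops : List (Nat × Int)) (e : List (List Int)) :
    (ops.foldl (fun e p => pvBump2 e p.1 c p.2) e).length = e.length := by
  
  induction ops generalizing e with
  | nil => rfl
  | cons p ops ih => rw [List.foldl_cons, ih, pvBump2_length]

theorem pvApplyCol_row_length (c : Nat) (ops : List (Nat × Int)) (e : List (List Int)) (i : Nat) :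
    ((ops.foldl (fun e p => pvBump2 e p.1 c p.2) e).getD i []).length = (e.getD i []).length := by
  
  induction ops generalizing e with
  | nil => rfl
  | cons p ops ih => rw [List.foldl_cons, ih, pvBump2_row_length]

theorem pvApplyCol_getD (c : Nat) (ops : List (Nat × Int)) (e : List (List Int)) (i c' : Nat)
    (hi : i < e.length) (hc : c' < (e.getD i []).length) :
    ((ops.foldl (fun e p => pvBump2 e p.1 c p.2) e).getD i []).getD c' 0 =
      (e.getD i []).getD c' 0 + (if c' = c then pvSumAt i ops else 0) := by
  
  induction ops generalizing e with
  | nil => simp [pvSumAt]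
  | cons p ops ih =>
    rw [List.foldl_cons]
    rw [ih _ (by rw [pvBump2_length]; exact hi) (by rw [pvBump2_row_length]; exact hc)]
    rw [pvBump2_getD e p.1 c p.2 i c' hi hc]
    have : pvSumAt i (p :: ops) = (if p.1 = i then p.2 else 0) + pvSumAt i ops := by
      simp [pvSumAt]
    rw [this]
    by_cases h : c' = c
    · subst h; by_cases hj : p.1 = i <;> simp [hj] <;> ring
    · have : ¬ (p.1 = i ∧ c = c') := by intro hx; exact h hx.2.symm
      simp [h, this]

-- ---- basic facts about the spec functions ----

theorem pvLwS_le (cells : List String) (i : Nat) : pvLwS cells i ≤ i := by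
  
  induction i with
  | zero => exact Nat.le_refl 0
  | succ i ih => unfold pvLwS; split <;> omega

theorem pvLwS_no_wall (cells : List String) {i j : Nat}
    (h1 : pvLwS cells i ≤ j) (h2 : j < i) : pvIsWall (cells.getD j "") = false := by
  
  induction i with
  | zero => omega
  | succ i ih =>
    by_cases hw : pvIsWall (cells.getD i "") = true
    · unfold pvLwS at h1; rw [if_pos hw] at h1; omega
    · unfold pvLwS at h1; rw [if_neg hw] at h1
      rcases Nat.lt_or_ge j i with hj | hj
      · exact ih h1 hj
      · have : j = i := by omega
        subst this
        simpa using hw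

theorem pvLwS_stable (cells : List String) {i j : Nat}
    (h1 : pvLwS cells i ≤ j) (h2 : j ≤ i) : pvLwS cells j = pvLwS cells i := by
  
  induction i with
  | zero => have : j = 0 := by omega
            subst this; rfl
  | succ i ih =>
    rcases Nat.lt_or_ge j (i+1) with hj | hj
    · by_cases hw : pvIsWall (cells.getD i "") = true
      · unfold pvLwS at h1; rw [if_pos hw] at h1; omega
      · have hstep : pvLwS cells (i+1) = pvLwS cells i := by
          simp only [pvLwS]; rw [if_neg hw]
        rw [hstep] at h1 ⊢
        exact ih h1 (by omega)
    · have : j = i + 1 := by omega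
      subst this; rfl

theorem pvFWF_ge (xs : List String) (i : Nat) : i ≤ pvFWF xs i := by
  
  induction xs generalizing i with
  | nil => exact Nat.le_refl i
  | cons x xs ih =>
    unfold pvFWF; split
    · exact Nat.le_refl i
    · exact Nat.le_trans (by omega) (ih (i+1))

theorem pvFWF_le (xs : List String) (i : Nat) : pvFWF xs i ≤ i + xs.length := by
  
  induction xs generalizing i with
  | nil => simp [pvFWF]
  | cons x xs ih =>
    unfold pvFWF; split
    · simp
    · have := ih (i+1); simp at this ⊢; omega

theorem pvRwS_ge (cells : List String) (j : Nat) : j ≤ pvRwS cells j := by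
  exact pvFWF_ge _ _

theorem pvRwS_le (cells : List String) (j : Nat) (h : j ≤ cells.length) :
    pvRwS cells j ≤ cells.length := by
  
  have := pvFWF_le (cells.drop j) j
  rw [List.length_drop] at this
  unfold pvRwS; omega

theorem pvRwS_step (cells : List String) (j : Nat) (h : j < cells.length) :
    pvRwS cells j = if pvIsWall (cells.getD j "") then j else pvRwS cells (j + 1) := by
  unfold pvRwS
  rw [List.drop_eq_getElem_cons h]
  simp only [pvFWF]
  rw [List.getD_eq_getElem cells "" h]

theorem pvRwS_stop (cells : List String) {j : Nat} (h : cells.length ≤ j) :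
    pvRwS cells j = j := by
  unfold pvRwS
  rw [List.drop_eq_nil_iff.mpr h]
  rfl

theorem pvRwS_eq (cells : List String) {j i : Nat} (hji : j ≤ i)
    (hnw : ∀ t, j ≤ t → t < i → pvIsWall (cells.getD t "") = false)
    (hi : i = cells.length ∨ (i < cells.length ∧ pvIsWall (cells.getD i "") = true)) :
    pvRwS cells j = i := by
  
  obtain ⟨d, rfl⟩ : ∃ d, i = j + d := ⟨i - j, by omega⟩
  clear hji
  induction d generalizing j with
  | zero =>
    simp only [Nat.add_zero] at hi ⊢
    rcases hi with h | ⟨h1, h2⟩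
    · exact pvRwS_stop cells (by omega)
    · rw [pvRwS_step cells j h1, if_pos h2]
  | succ d ih =>
    have hjlen : j < cells.length := by rcases hi with h | ⟨h1, _⟩ <;> omega
    have hnwj : pvIsWall (cells.getD j "") = false := hnw j (Nat.le_refl j) (by omega)
    have hi' : (j+1) + d = cells.length ∨ ((j+1) + d < cells.length ∧
        pvIsWall (cells.getD ((j+1)+d) "") = true) := by
      rw [show (j+1) + d = j + (d+1) by omega]; exact hi
    have hnw' : ∀ t, j + 1 ≤ t → t < (j+1) + d → pvIsWall (cells.getD t "") = false := by
      intro t ht1 ht2; exact hnw t (by omega) (by omega)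
    have hrec := ih hnw' hi'
    rw [pvRwS_step cells j hjlen, hnwj]
    simp only [Bool.false_eq_true, if_false]
    omega

theorem pvCnt_append (l l' : List String) : pvCnt (l ++ l') = pvCnt l + pvCnt l' := by
  simp [pvCnt]

theorem pvCntE_self (cells : List String) (a : Nat) : pvCntE cells a a = 0 := by
  simp [pvCntE, pvCnt]

theorem pvCntE_succ (cells : List String) {lw i : Nat} (h1 : lw ≤ i) (h2 : i < cells.length) :
    pvCntE cells lw (i + 1) = pvCntE cells lw i + (if cells.getD i "" = "E" then 1 else 0) := by
  
  unfold pvCntE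
  have h3 : i + 1 - lw = (i - lw) + 1 := by omega
  rw [h3, List.take_succ, pvCnt_append]
  have h4 : (cells.drop lw)[i - lw]? = some cells[i] := by
    rw [List.getElem?_drop]
    rw [show lw + (i - lw) = i by omega]
    exact List.getElem?_eq_getElem h2
  rw [h4]
  have h5 : cells.getD i "" = cells[i] := List.getD_eq_getElem cells "" h2
  rw [h5]
  simp [pvCnt]

theorem pvCntE_split (cells : List String) {a b : Nat} (hab : a ≤ b) :
    pvCnt (cells.take b) = pvCnt (cells.take a) + pvCntE cells a b := by
  
  unfold pvCntE
  rw [show b = a + (b - a) by omega, List.take_add, pvCnt_append]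
  rw [show a + (b - a) - a = b - a by omega]

-- value of pvFin on a closed segment [lw, i)
theorem pvFin_segment (cells : List String) {i j : Nat}
    (hj1 : pvLwS cells i ≤ j) (hj2 : j < i)
    (hi : i = cells.length ∨ (i < cells.length ∧ pvIsWall (cells.getD i "") = true)) :
    pvFin cells j = pvCntE cells (pvLwS cells i) i := by
  
  have hw : pvIsWall (cells.getD j "") = false := pvLwS_no_wall cells hj1 hj2
  have hlw : pvLwS cells j = pvLwS cells i := pvLwS_stable cells hj1 (by omega)
  have hrw : pvRwS cells j = i := by
    apply pvRwS_eq cells (by omega) _ hi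
    intro t ht1 ht2
    exact pvLwS_no_wall cells (Nat.le_trans hj1 ht1) ht2
  have hw' : pvIsWall (cells[j]?.getD "") = false := by
    rw [← List.getD_eq_getElem?_getD]; exact hw
  simp [pvFin, hw, hw', hlw, hrw]

-- ---- A-side: the operation list realizes pvFin ----

theorem pvSumAt_append (j : Nat) (o1 o2 : List (Nat × Int)) :
    pvSumAt j (o1 ++ o2) = pvSumAt j o1 + pvSumAt j o2 := by
  simp [pvSumAt]

theorem pvSumAt_batch (j lw d : Nat) (v : Int) :
    pvSumAt j ((List.range' lw d).map (fun t => (t, v))) =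
      if lw ≤ j ∧ j < lw + d then v else 0 := by
  
  induction d generalizing lw with
  | zero =>
    rw [if_neg (by omega)]
    simp [pvSumAt]
  | succ d ih =>
    rw [List.range'_succ, List.map_cons]
    have : pvSumAt j (((lw, v)) :: (List.range' (lw+1) d).map (fun t => (t, v))) =
        (if lw = j then v else 0) + pvSumAt j ((List.range' (lw+1) d).map (fun t => (t, v))) := by
      simp [pvSumAt]
    rw [this, ih]
    split_ifs <;> omega

theorem pvPassOps_congr (cell cell' : Nat → String) (len : Nat)
    (h : ∀ i, i < len → cell i = cell' i) : pvPassOps cell len = pvPassOps cell' len := by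
  
  have haux : ∀ (L : List Nat), (∀ i ∈ L, cell i = cell' i) →
      ∀ (st : List (Nat × Int) × Int × Nat),
      L.foldl (pvPassStep cell) st = L.foldl (pvPassStep cell') st := by
    intro L hL
    induction L with
    | nil => intro st; rfl
    | cons a L ihL =>
      intro st
      rw [List.foldl_cons, List.foldl_cons]
      have h1 : pvPassStep cell st a = pvPassStep cell' st a := by
        unfold pvPassStep; rw [hL a (by simp)]
      rw [h1]
      exact ihL (fun i hi => hL i (by simp [hi])) _
  unfold pvPassOps
  rw [haux (List.range len) (fun i hi => h i (List.mem_range.mp hi))]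

theorem pvPassOps_spec (cells : List String) (j : Nat) (hj : j < cells.length) :
    pvSumAt j (pvPassOps (fun i => cells.getD i "") cells.length) = pvFin cells j := by
  
  have inv : ∀ i, i ≤ cells.length →
      ((List.range i).foldl (pvPassStep (fun u => cells.getD u "")) ([], 0, 0)).2.2
        = pvLwS cells i ∧
      ((List.range i).foldl (pvPassStep (fun u => cells.getD u "")) ([], 0, 0)).2.1
        = pvCntE cells (pvLwS cells i) i ∧
      ∀ t, pvSumAt t ((List.range i).foldl (pvPassStep (fun u => cells.getD u "")) ([], 0, 0)).1
        = if t < pvLwS cells i then pvFin cells t else 0 := by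
    intro i
    induction i with
    | zero =>
      intro _
      refine ⟨rfl, by simp [pvCntE_self, pvLwS], fun t => by simp [pvSumAt, pvLwS]⟩
    | succ i ihi =>
      intro hi
      obtain ⟨h1, h2, h3⟩ := ihi (by omega)
      rw [List.range_succ, List.foldl_append, List.foldl_cons, List.foldl_nil]
      set st := (List.range i).foldl (pvPassStep fun u => cells.getD u "") ([], 0, 0) with hst
      have hlwle : pvLwS cells i ≤ i := pvLwS_le cells i
      by_cases hE : cells.getD i "" = "E"
      · have hstep : pvPassStep (fun u => cells.getD u "") st i = (st.1, st.2.1 + 1, st.2.2) := by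
          simp only [pvPassStep]
          rw [if_pos hE]
        have hnw : pvIsWall (cells.getD i "") = false := by rw [hE]; decide
        have hlw : pvLwS cells (i+1) = pvLwS cells i := by
          simp only [pvLwS, hnw, Bool.false_eq_true, if_false]
        rw [hstep]
        refine ⟨by rw [hlw]; exact h1, ?_, fun t => by rw [hlw]; exact h3 t⟩
        show st.2.1 + 1 = _
        rw [h2, hlw, pvCntE_succ cells (by omega) (by omega), hE]
        simp
      · by_cases h0 : cells.getD i "" = "0"
        · have hstep : pvPassStep (fun u => cells.getD u "") st i = st := by
            simp only [pvPassStep]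
            rw [if_neg hE, if_pos h0]
          have hnw : pvIsWall (cells.getD i "") = false := by rw [h0]; decide
          have hlw : pvLwS cells (i+1) = pvLwS cells i := by
            simp only [pvLwS, hnw, Bool.false_eq_true, if_false]
          rw [hstep]
          refine ⟨by rw [hlw]; exact h1, ?_, fun t => by rw [hlw]; exact h3 t⟩
          rw [h2, hlw, pvCntE_succ cells (by omega) (by omega), h0]
          simp
        · have hstep : pvPassStep (fun u => cells.getD u "") st i =
              (st.1 ++ (List.range' st.2.2 (i - st.2.2)).map (fun j => (j, st.2.1)), 0, i + 1) := by
            simp only [pvPassStep]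
            rw [if_neg hE, if_neg h0]
          have hw : pvIsWall (cells.getD i "") = true := by
            simp only [pvIsWall, Bool.and_eq_true, decide_eq_true_eq]
            exact ⟨hE, h0⟩
          have hlw : pvLwS cells (i+1) = i + 1 := by
            simp only [pvLwS, hw]
            simp
          rw [hstep]
          refine ⟨by rw [hlw], by rw [hlw]; exact (pvCntE_self cells (i+1)).symm, fun t => ?_⟩
          show pvSumAt t (st.1 ++ (List.range' st.2.2 (i - st.2.2)).map (fun j => (j, st.2.1))) = _
          rw [pvSumAt_append, h3 t, pvSumAt_batch, h1, h2, hlw]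
          by_cases ht1 : t < pvLwS cells i
          · rw [if_pos ht1, if_neg (by omega), if_pos (by omega)]
            ring
          · rw [if_neg ht1]
            by_cases ht2 : t < i
            · rw [if_pos (by omega), if_pos (by omega)]
              rw [pvFin_segment cells (by omega) (by omega) (Or.inr ⟨by omega, hw⟩)]
              ring
            · rw [if_neg (by omega)]
              by_cases ht3 : t = i
              · subst ht3
                rw [if_pos (by omega)]
                have hw' : pvIsWall (cells[t]?.getD "") = true := by
                  rw [← List.getD_eq_getElem?_getD]; exact hw
                simp [pvFin, hw, hw']
              · rw [if_neg (by omega)]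
                simp
  obtain ⟨h1, h2, h3⟩ := inv cells.length (Nat.le_refl _)
  have hlwle : pvLwS cells cells.length ≤ cells.length := pvLwS_le cells cells.length
  unfold pvPassOps
  rw [pvSumAt_append, h3 j, pvSumAt_batch, h1, h2]
  by_cases hlt : j < pvLwS cells cells.length
  · rw [if_pos hlt, if_neg (by omega)]
    ring
  · rw [if_neg hlt, if_pos (by omega)]
    rw [pvFin_segment cells (by omega) (by omega) (Or.inl rfl)]
    ring

-- ---- B-side: the tables realize pvFin ----

theorem pvLeftLoop_length (xs : List String) (i lw : Nat) :
    (pvLeftLoop xs i lw).length = xs.length := by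
  
  induction xs generalizing i lw with
  | nil => rfl
  | cons x xs ih => simp [pvLeftLoop, ih]

theorem pvLeftLoop_getD (cells : List String) (t : Nat) (d : Nat) (h : d + t < cells.length) :
    (pvLeftLoop (cells.drop d) d (pvLwS cells d)).getD t 0 = pvLwS cells (d + t) := by
  
  induction t generalizing d with
  | zero =>
    rw [List.drop_eq_getElem_cons (by omega : d < cells.length)]
    rfl
  | succ t ih =>
    rw [List.drop_eq_getElem_cons (by omega : d < cells.length)]
    unfold pvLeftLoop
    have hx : cells[d] = cells.getD d "" := (List.getD_eq_getElem cells "" (by omega)).symm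
    have hstep : (if pvIsWall cells[d] then d + 1 else pvLwS cells d) = pvLwS cells (d+1) := by
      rw [hx]; rfl
    rw [List.getD_cons_succ, hstep]
    have := ih (d+1) (by omega)
    rw [show d + 1 + t = d + (t+1) by omega] at this
    exact this

theorem pvRightLoop_acc (ps : List (String × Nat)) (rw : Nat) (acc : List Nat) :
    pvRightLoop ps rw acc = pvRightLoop ps rw [] ++ acc := by
  
  induction ps generalizing rw acc with
  | nil => rfl
  | cons p ps ih =>
    obtain ⟨x, i⟩ := p
    unfold pvRightLoop
    split
    · rw [ih _ (i :: acc), ih _ [i], List.append_assoc]; rfl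
    · rw [ih _ (rw :: acc), ih _ [rw], List.append_assoc]; rfl

theorem pvFWF_append_singleton (xs : List String) (y : String) (i : Nat) :
    pvFWF (xs ++ [y]) i =
      if pvFWF xs i < i + xs.length then pvFWF xs i
      else if pvIsWall y then i + xs.length else i + xs.length + 1 := by
  
  induction xs generalizing i with
  | nil =>
    simp only [List.nil_append, List.length_nil, Nat.add_zero]
    rw [show pvFWF [] i = i from rfl, if_neg (by omega)]
    simp only [pvFWF]
  | cons x xs ih =>
    by_cases hw : pvIsWall x = true
    · have l1 : pvFWF ((x :: xs) ++ [y]) i = i := by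
        simp only [List.cons_append, pvFWF]; rw [if_pos hw]
      have l2 : pvFWF (x :: xs) i = i := by simp only [pvFWF]; rw [if_pos hw]
      rw [l1, l2, if_pos (by simp only [List.length_cons]; omega)]
    · have l1 : pvFWF ((x :: xs) ++ [y]) i = pvFWF (xs ++ [y]) (i+1) := by
        simp only [List.cons_append, pvFWF]; rw [if_neg hw]
      have l2 : pvFWF (x :: xs) i = pvFWF xs (i+1) := by simp only [pvFWF]; rw [if_neg hw]
      rw [l1, l2, ih (i+1)]
      simp only [List.length_cons]
      rw [show i + 1 + xs.length = i + (xs.length + 1) by omega]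

theorem pvRwS_append (l : List String) (y : String) {t : Nat} (h : t ≤ l.length) :
    pvRwS (l ++ [y]) t = if pvRwS l t < l.length then pvRwS l t
      else if pvIsWall y then l.length else l.length + 1 := by
  unfold pvRwS
  rw [List.drop_append_of_le_length h, pvFWF_append_singleton, List.length_drop]
  rw [show t + (l.length - t) = l.length by omega]

theorem pvRightLoop_main (cells : List String) (R : Nat) :
    pvRightLoop cells.zipIdx.reverse R [] =
      (List.range cells.length).map
        (fun t => if pvRwS cells t < cells.length then pvRwS cells t else R) := by
  induction cells using List.reverseRecOn generalizing R with
  | nil => simp [pvRightLoop]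
  | append_singleton l y ih =>
    rw [List.zipIdx_append, List.reverse_append]
    have hz : List.zipIdx [y] (0 + l.length) = [(y, l.length)] := by simp [List.zipIdx]
    rw [hz]
    simp only [List.reverse_singleton, List.singleton_append, List.length_append,
      List.length_singleton]
    have hkl : pvRwS l l.length = l.length := pvRwS_stop l (Nat.le_refl _)
    have happ : pvRwS (l ++ [y]) l.length = if pvIsWall y then l.length else l.length + 1 := by
      rw [pvRwS_append l y (Nat.le_refl _), hkl, if_neg (by omega)]
    have helem : ∀ rw0, rw0 = (if pvIsWall y then l.length else R) →
        ∀ t ∈ List.range l.length,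
        (if pvRwS l t < l.length then pvRwS l t else rw0)
          = if pvRwS (l ++ [y]) t < l.length + 1 then pvRwS (l ++ [y]) t else R := by
      intro rw0 hrw0 t ht
      have ht' : t < l.length := List.mem_range.mp ht
      rw [pvRwS_append l y (by omega)]
      by_cases h1 : pvRwS l t < l.length
      · rw [if_pos h1, if_pos h1, if_pos (by omega)]
      · rw [if_neg h1, if_neg h1]
        by_cases hwy : pvIsWall y = true
        · rw [if_pos hwy, if_pos (by omega), hrw0, if_pos hwy]
        · rw [if_neg hwy, if_neg (by omega), hrw0, if_neg hwy]
    rw [List.range_succ, List.map_append, List.map_singleton]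
    simp only [pvRightLoop]
    by_cases hwy : pvIsWall y = true
    · rw [if_pos hwy, pvRightLoop_acc _ _ [l.length], ih l.length]
      congr 1
      · exact List.map_congr_left (helem l.length (by rw [if_pos hwy]))
      · rw [happ]
        simp [hwy]
    · rw [if_neg hwy, pvRightLoop_acc _ _ [R], ih R]
      congr 1
      · exact List.map_congr_left (helem R (by rw [if_neg hwy]))
      · rw [happ]
        simp [hwy]

theorem pvScanl_getD (cells : List String) (a : Int) (t : Nat) (h : t ≤ cells.length) :
    (List.scanl (fun a x => a + (if x = "E" then (1 : Int) else 0)) a cells).getD t 0 =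
      a + pvCnt (cells.take t) := by
  
  induction cells generalizing a t with
  | nil =>
    have : t = 0 := by simpa using h
    subst this
    simp [pvCnt]
  | cons x xs ih =>
    rw [List.scanl_cons]
    cases t with
    | zero => simp [pvCnt]
    | succ t =>
      rw [List.getD_cons_succ]
      rw [ih (a + if x = "E" then 1 else 0) t (by simpa using h)]
      simp only [List.take_succ_cons, pvCnt, List.map_cons, List.sum_cons]
      ring

theorem pvLineCounts_getD (cells : List String) (t : Nat) (ht : t < cells.length) :
    (pvLineCounts cells).getD t 0 = pvFin cells t := by
  have hLlen : (pvLeftLoop cells 0 0).length = cells.length := pvLeftLoop_length cells 0 0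
  have hRmain := pvRightLoop_main cells cells.length
  have hRlen : (pvRightLoop cells.zipIdx.reverse cells.length []).length = cells.length := by
    rw [hRmain, List.length_map, List.length_range]
  have hrw_le : pvRwS cells t ≤ cells.length := pvRwS_le cells t (by omega)
  have hlw_le : pvLwS cells t ≤ t := pvLwS_le cells t
  have ht_rw : t ≤ pvRwS cells t := pvRwS_ge cells t
  unfold pvLineCounts
  have hzlen : (cells.zip ((pvLeftLoop cells 0 0).zip
      (pvRightLoop cells.zipIdx.reverse cells.length []))).length = cells.length := by
    simp only [List.length_zip, hLlen, hRlen]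
    omega
  rw [List.getD_eq_getElem _ 0 (by rw [List.length_map]; omega)]
  rw [List.getElem_map]
  simp only [List.getElem_zip]
  have hleft : (pvLeftLoop cells 0 0)[t]'(by omega) = pvLwS cells t := by
    have h0 := pvLeftLoop_getD cells t 0 (by omega)
    simp only [List.drop_zero, Nat.zero_add, pvLwS] at h0
    rw [← h0]
    exact (List.getD_eq_getElem _ 0 (by omega)).symm
  have hright : (pvRightLoop cells.zipIdx.reverse cells.length [])[t]'(by omega)
      = pvRwS cells t := by
    rw [← List.getD_eq_getElem _ 0 (by omega), hRmain]
    rw [List.getD_eq_getElem _ 0 (by rw [List.length_map, List.length_range]; omega)]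
    rw [List.getElem_map]
    simp only [List.getElem_range]
    by_cases h1 : pvRwS cells t < cells.length
    · rw [if_pos h1]
    · rw [if_neg h1]; omega
  rw [hleft, hright]
  have hpref : ∀ u, u ≤ cells.length →
      (List.scanl (fun a x => a + (if x = "E" then (1:Int) else 0)) 0 cells).getD u 0
        = pvCnt (cells.take u) := by
    intro u hu
    have := pvScanl_getD cells 0 u hu
    simpa using this
  rw [hpref (pvRwS cells t) hrw_le, hpref (pvLwS cells t) (by omega)]
  have hgd : cells.getD t "" = cells[t]'(by omega) := List.getD_eq_getElem cells "" (by omega)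
  unfold pvFin
  rw [hgd]
  by_cases hw : pvIsWall (cells[t]'(by omega)) = true
  · rw [if_pos hw, if_pos hw]
  · rw [if_neg hw, if_neg hw]
    rw [pvCntE_split cells (show pvLwS cells t ≤ pvRwS cells t by omega)]
    ring

-- ---- assembly: pointwise characterization of both ports ----

theorem pvSum_single (n r : Nat) (f : Nat → Int) (h : r < n) :
    ((List.range n).map (fun r' => if r' = r then f r' else 0)).sum = f r := by
  induction n with
  | zero => omega
  | succ n ih =>
    rw [List.range_succ, List.map_append, List.sum_append]
    by_cases hr : r < n
    · rw [ih hr]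
      simp [show ¬ (n = r) by omega]
    · have : r = n := by omega
      subst this
      have hz : ((List.range r).map (fun r' => if r' = r then f r' else 0)).sum = 0 := by
        apply List.sum_eq_zero
        intro x hx
        obtain ⟨r', hr', rfl⟩ := List.mem_map.mp hx
        rw [if_neg (by have := List.mem_range.mp hr'; omega)]
      rw [hz]
      simp

theorem pvRowPhase_length (L : List Nat) (opsf : Nat → List (Nat × Int)) (e : List (List Int)) :
    (L.foldl (fun e r' => (opsf r').foldl (fun e p => pvBump2 e r' p.1 p.2) e) e).length
      = e.length := by
  induction L generalizing e with
  | nil => rfl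
  | cons a L ih => rw [List.foldl_cons, ih, pvApplyRow_length]

theorem pvRowPhase_row_length (L : List Nat) (opsf : Nat → List (Nat × Int))
    (e : List (List Int)) (i : Nat) :
    ((L.foldl (fun e r' => (opsf r').foldl (fun e p => pvBump2 e r' p.1 p.2) e) e).getD i []).length
      = (e.getD i []).length := by
  induction L generalizing e with
  | nil => rfl
  | cons a L ih => rw [List.foldl_cons, ih, pvApplyRow_row_length]

theorem pvRowPhase_getD (L : List Nat) (opsf : Nat → List (Nat × Int)) (e : List (List Int))
    (r c : Nat) (hr : r < e.length) (hc : c < (e.getD r []).length) :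
    ((L.foldl (fun e r' => (opsf r').foldl (fun e p => pvBump2 e r' p.1 p.2) e) e).getD r []).getD c 0
      = (e.getD r []).getD c 0 + (L.map (fun r' => if r' = r then pvSumAt c (opsf r') else 0)).sum := by
  induction L generalizing e with
  | nil => simp
  | cons a L ih =>
    rw [List.foldl_cons, List.map_cons, List.sum_cons]
    rw [ih _ (by rw [pvApplyRow_length]; exact hr) (by rw [pvApplyRow_row_length]; exact hc)]
    rw [pvApplyRow_getD a (opsf a) e r c hr hc]
    by_cases h : a = r
    · subst h; simp; ring
    · simp [h]

theorem pvColPhase_length (L : List Nat) (opsf : Nat → List (Nat × Int)) (e : List (List Int)) :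
    (L.foldl (fun e c' => (opsf c').foldl (fun e p => pvBump2 e p.1 c' p.2) e) e).length
      = e.length := by
  induction L generalizing e with
  | nil => rfl
  | cons a L ih => rw [List.foldl_cons, ih, pvApplyCol_length]

theorem pvColPhase_row_length (L : List Nat) (opsf : Nat → List (Nat × Int))
    (e : List (List Int)) (i : Nat) :
    ((L.foldl (fun e c' => (opsf c').foldl (fun e p => pvBump2 e p.1 c' p.2) e) e).getD i []).length
      = (e.getD i []).length := by
  induction L generalizing e with
  | nil => rfl
  | cons a L ih => rw [List.foldl_cons, ih, pvApplyCol_row_length]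

theorem pvColPhase_getD (L : List Nat) (opsf : Nat → List (Nat × Int)) (e : List (List Int))
    (r c : Nat) (hr : r < e.length) (hc : c < (e.getD r []).length) :
    ((L.foldl (fun e c' => (opsf c').foldl (fun e p => pvBump2 e p.1 c' p.2) e) e).getD r []).getD c 0
      = (e.getD r []).getD c 0 + (L.map (fun c' => if c' = c then pvSumAt r (opsf c') else 0)).sum := by
  induction L generalizing e with
  | nil => simp
  | cons a L ih =>
    rw [List.foldl_cons, List.map_cons, List.sum_cons]
    rw [ih _ (by rw [pvApplyCol_length]; exact hr) (by rw [pvApplyCol_row_length]; exact hc)]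
    rw [pvApplyCol_getD a (opsf a) e r c hr hc]
    by_cases h : a = c
    · subst h; simp; ring
    · simp [h, Ne.symm h]

-- count_enemies, with each sweep replaced by the fold of its operation list
theorem pvA_eq_phases (grid : List (List String)) :
    count_enemies grid =
      (List.range (grid.getD 0 []).length).foldl
        (fun e c => (pvPassOps (fun row => (grid.getD row []).getD c "") grid.length).foldl
          (fun e p => pvBump2 e p.1 c p.2) e)
        ((List.range grid.length).foldl
          (fun e r => (pvPassOps (fun col => (grid.getD r []).getD col "") (grid.getD 0 []).length).foldl
            (fun e p => pvBump2 e r p.1 p.2) e)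
          (List.replicate grid.length (List.replicate (grid.getD 0 []).length (0:Int)))) := by
  simp only [count_enemies]
  congr 1
  · funext e c
    exact pvPass_eq_ops _ _ _ _
  · congr 1
    funext e r
    exact pvPass_eq_ops _ _ _ _

-- ===== VERDICT (by name: the statement is the Claim_ definition above) =====
theorem count_enemies_spec : Claim_equal_count_enemies := by
  unfold Claim_equal_count_enemies
  intro grid _ hpre
  unfold Spec_count_enemies
  obtain ⟨hne, hm0, hrows⟩ := hpre
  have hhead : grid.headD [] = grid.getD 0 [] := by
    cases grid with
    | nil => rfl
    | cons a l => rfl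
  rw [hhead] at hm0 hrows
  have hn0 : 0 < grid.length := by
    cases grid with
    | nil => exact absurd rfl hne
    | cons a l => simp
  have hrowlen : ∀ r, r < grid.length → (grid.getD 0 []).length ≤ (grid.getD r []).length := by
    intro r hr
    apply hrows
    rw [List.getD_eq_getElem grid [] hr]
    exact List.getElem_mem hr
  -- shapes of A's result
  have hAlen : (count_enemies grid).length = grid.length := by
    rw [pvA_eq_phases, pvColPhase_length, pvRowPhase_length, List.length_replicate]
  have hArow : ∀ r, r < grid.length →
      ((count_enemies grid).getD r []).length = (grid.getD 0 []).length := by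
    intro r hr
    rw [pvA_eq_phases, pvColPhase_row_length, pvRowPhase_row_length,
      List.getD_replicate _ hr, List.length_replicate]
  -- pointwise value of A's result
  have hval : ∀ r c, r < grid.length → c < (grid.getD 0 []).length →
      ((count_enemies grid).getD r []).getD c 0
        = pvFin ((grid.getD r []).take (grid.getD 0 []).length) c
          + pvFin ((List.range grid.length).map (fun r' => (grid.getD r' []).getD c "")) r := by
    intro r c hr hc
    have hbase_r : r < (List.replicate grid.length
        (List.replicate (grid.getD 0 []).length (0:Int))).length := by
      rw [List.length_replicate]; exact hr
    have hbase_c : c < ((List.replicate grid.length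
        (List.replicate (grid.getD 0 []).length (0:Int))).getD r []).length := by
      rw [List.getD_replicate _ hr, List.length_replicate]; exact hc
    rw [pvA_eq_phases]
    rw [pvColPhase_getD _ _ _ r c
      (by rw [pvRowPhase_length]; exact hbase_r)
      (by rw [pvRowPhase_row_length]; exact hbase_c)]
    rw [pvRowPhase_getD _ _ _ r c hbase_r hbase_c]
    rw [List.getD_replicate _ hr, List.getD_replicate _ hc]
    rw [pvSum_single grid.length r _ hr, pvSum_single (grid.getD 0 []).length c _ hc]
    -- rewrite the two operation lists through the cell lists
    have hrclen : ((grid.getD r []).take (grid.getD 0 []).length).length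
        = (grid.getD 0 []).length := by
      rw [List.length_take]
      have := hrowlen r hr
      omega
    have hcclen : ((List.range grid.length).map
        (fun r' => (grid.getD r' []).getD c "")).length = grid.length := by
      rw [List.length_map, List.length_range]
    have hopsrow : pvSumAt c (pvPassOps (fun col => (grid.getD r []).getD col "")
          (grid.getD 0 []).length)
        = pvFin ((grid.getD r []).take (grid.getD 0 []).length) c := by
      have hspec := pvPassOps_spec ((grid.getD r []).take (grid.getD 0 []).length) c
        (by rw [hrclen]; exact hc)
      rw [hrclen] at hspec
      rw [pvPassOps_congr _ (fun i => ((grid.getD r []).take (grid.getD 0 []).length).getD i "") _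
        (by
          intro i hi
          show (grid.getD r []).getD i ""
            = ((grid.getD r []).take (grid.getD 0 []).length).getD i ""
          rw [List.getD_eq_getElem _ "" (by have := hrowlen r hr; omega),
            List.getD_eq_getElem _ "" (by rw [hrclen]; omega)]
          exact List.getElem_take.symm)]
      exact hspec
    have hopscol : pvSumAt r (pvPassOps (fun row => (grid.getD row []).getD c "") grid.length)
        = pvFin ((List.range grid.length).map (fun r' => (grid.getD r' []).getD c "")) r := by
      have hspec := pvPassOps_spec
        ((List.range grid.length).map (fun r' => (grid.getD r' []).getD c "")) r
        (by rw [hcclen]; exact hr)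
      rw [hcclen] at hspec
      rw [pvPassOps_congr _
        (fun i => ((List.range grid.length).map (fun r' => (grid.getD r' []).getD c "")).getD i "") _
        (by
          intro i hi
          show (grid.getD i []).getD c ""
            = ((List.range grid.length).map (fun r' => (grid.getD r' []).getD c "")).getD i ""
          rw [List.getD_eq_getElem
            ((List.range grid.length).map (fun r' => (grid.getD r' []).getD c "")) ""
            (by rw [hcclen]; omega)]
          rw [List.getElem_map]
          rw [List.getElem_range])]
      exact hspec
    rw [hopsrow, hopscol]
    ring
  -- shapes and pointwise value of B's result
  have hAltlen : (count_enemies_alt grid).length = grid.length := by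
    simp only [count_enemies_alt]
    rw [List.length_map, List.length_range]
  have hAltrow : ∀ r, r < grid.length →
      ((count_enemies_alt grid).getD r []).length = (grid.getD 0 []).length := by
    intro r hr
    simp only [count_enemies_alt]
    rw [List.getD_eq_getElem _ [] (by rw [List.length_map, List.length_range]; exact hr)]
    simp only [List.getElem_map, List.getElem_range]
    rw [List.length_map, List.length_range]
  have hAltval : ∀ r c, r < grid.length → c < (grid.getD 0 []).length →
      ((count_enemies_alt grid).getD r []).getD c 0
        = pvFin ((grid.getD r []).take (grid.getD 0 []).length) c
          + pvFin ((List.range grid.length).map (fun r' => (grid.getD r' []).getD c "")) r := by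
    intro r c hr hc
    have hrclen : ((grid.getD r []).take (grid.getD 0 []).length).length
        = (grid.getD 0 []).length := by
      rw [List.length_take]
      have := hrowlen r hr
      omega
    have hcclen : ((List.range grid.length).map
        (fun r' => (grid.getD r' []).getD c "")).length = grid.length := by
      rw [List.length_map, List.length_range]
    simp only [count_enemies_alt]
    rw [List.getD_eq_getElem _ [] (by rw [List.length_map, List.length_range]; exact hr)]
    simp only [List.getElem_map, List.getElem_range]
    rw [List.getD_eq_getElem _ 0 (by rw [List.length_map, List.length_range]; exact hc)]
    simp only [List.getElem_map, List.getElem_range]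
    have hrowc : (grid.map (fun row => pvLineCounts (row.take (grid.getD 0 []).length))).getD r []
        = pvLineCounts ((grid.getD r []).take (grid.getD 0 []).length) := by
      rw [List.getD_eq_getElem _ [] (by rw [List.length_map]; exact hr)]
      rw [List.getElem_map]
      rw [List.getD_eq_getElem grid [] hr]
    have hcolc : (((List.range (grid.getD 0 []).length).map
          (fun c' => (List.range grid.length).map (fun r' => (grid.getD r' []).getD c' ""))).map
          pvLineCounts).getD c []
        = pvLineCounts ((List.range grid.length).map (fun r' => (grid.getD r' []).getD c "")) := by
      rw [List.getD_eq_getElem _ []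
        (by rw [List.length_map, List.length_map, List.length_range]; exact hc)]
      rw [List.getElem_map]
      simp only [List.getElem_map, List.getElem_range]
    rw [hrowc, hcolc]
    rw [pvLineCounts_getD _ c (by rw [hrclen]; exact hc)]
    rw [pvLineCounts_getD _ r (by rw [hcclen]; exact hr)]
  -- assemble
  apply List.ext_getElem (by rw [hAlen, hAltlen])
  intro r h1 h2
  have hr : r < grid.length := by rw [hAlen] at h1; exact h1
  have eA : (count_enemies grid).getD r [] = (count_enemies grid)[r] :=
    List.getD_eq_getElem _ [] h1
  have eB : (count_enemies_alt grid).getD r [] = (count_enemies_alt grid)[r] :=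
    List.getD_eq_getElem _ [] h2
  apply List.ext_getElem (by rw [← eA, ← eB, hArow r hr, hAltrow r hr])
  intro c hc1 hc2
  have hc : c < (grid.getD 0 []).length := by
    rw [← eA, hArow r hr] at hc1
    exact hc1
  have e1 : ((count_enemies grid).getD r []).getD c 0 = (count_enemies grid)[r][c] := by
    rw [eA]
    exact List.getD_eq_getElem _ 0 hc1
  have e2 : ((count_enemies_alt grid).getD r []).getD c 0 = (count_enemies_alt grid)[r][c] := by
    rw [eB]
    exact List.getD_eq_getElem _ 0 hc2
  rw [← e1, ← e2, hval r c hr hc, hAltval r c hr hc]
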